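-- pv_equiv track=rewrite | github.com/lmnogues/adventofcode | 2021/05.py | filter_part1
-- ===== SOURCE A (Python) =====
-- def filter_part1(inputs):
--     result=[]
--     max_x=max_y=0
--     for input in inputs:
--         if input[0][0]==input[1][0] or input[0][1]==input[1][1]:
--             result.append(input)
--         if max_x < input[0][0] or max_x < input[1][0]:
--             max_x = max(input[0][0],input[1][0])
--         if max_y < input[0][1] or max_y < input[1][1]:
--             max_y=max(input[0][1],input[1][1])
--
--     return result,(max_x+1,max_y+1)
-- ===== SOURCE B (Python) =====
-- def _solve(lst):
--     # divide and conquer: combine (filtered-segments, max_x, max_y) of the two halves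
--     if not lst:
--         return [], 0, 0
--     if len(lst) == 1:
--         ((x1, y1), (x2, y2)) = lst[0]
--         seg = [lst[0]] if x1 == x2 or y1 == y2 else []
--         return seg, max(0, x1, x2), max(0, y1, y2)
--     mid = len(lst) // 2
--     r1, a1, b1 = _solve(lst[:mid])
--     r2, a2, b2 = _solve(lst[mid:])
--     return r1 + r2, max(a1, a2), max(b1, b2)
--
-- def filter_part1(inputs):
--     res, mx, my = _solve(inputs)
--     return res, (mx + 1, my + 1)
-- ===== Notes on version B (the rewrite author's own statement) =====
-- stated objective: alternative
-- what changed: Replaces A's single left-to-right fused loop with a recursive divide-and-conquer: the list is split in halves, each half solved recursively down to singleton leaves (where the filter test and 0-seeded coordinate maxima are computed), and the halves' (segments, max_x, max_y) triples are merged by concatenation and max.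
import Mathlib
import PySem

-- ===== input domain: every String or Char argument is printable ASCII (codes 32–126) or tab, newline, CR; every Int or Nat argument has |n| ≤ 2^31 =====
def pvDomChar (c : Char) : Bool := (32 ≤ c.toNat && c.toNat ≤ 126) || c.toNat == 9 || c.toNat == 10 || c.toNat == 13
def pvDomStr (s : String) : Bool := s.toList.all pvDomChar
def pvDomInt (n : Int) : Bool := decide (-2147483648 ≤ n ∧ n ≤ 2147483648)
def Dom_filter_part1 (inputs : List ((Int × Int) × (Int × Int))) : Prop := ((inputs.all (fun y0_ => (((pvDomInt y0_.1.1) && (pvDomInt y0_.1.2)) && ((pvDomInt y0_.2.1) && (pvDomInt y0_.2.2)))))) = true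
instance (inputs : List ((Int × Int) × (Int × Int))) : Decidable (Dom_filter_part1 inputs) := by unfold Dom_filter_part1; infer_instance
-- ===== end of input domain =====

-- ===== PORT A =====
-- B replaces A's single fused accumulator loop by a recursive divide-and-conquer over halves; objective: alternative decomposition, same results.
def filter_part1 (inputs : List ((Int × Int) × (Int × Int))) : (List ((Int × Int) × (Int × Int))) × (Int × Int) :=
  let st := inputs.foldl
    (fun (st : List ((Int × Int) × (Int × Int)) × Int × Int) input =>
      let result := if input.1.1 = input.2.1 ∨ input.1.2 = input.2.2 then st.1 ++ [input] else st.1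
      let max_x := if st.2.1 < input.1.1 ∨ st.2.1 < input.2.1 then max input.1.1 input.2.1 else st.2.1
      let max_y := if st.2.2 < input.1.2 ∨ st.2.2 < input.2.2 then max input.1.2 input.2.2 else st.2.2
      (result, max_x, max_y))
    ([], 0, 0)
  (st.1, (st.2.1 + 1, st.2.2 + 1))

-- ===== PORT B =====
-- _solve from Source B: divide and conquer on list halves (Python slices lst[:mid]/lst[mid:] = take/drop)
def fpSolve (l : List ((Int × Int) × (Int × Int))) : List ((Int × Int) × (Int × Int)) × Int × Int :=
  match l with
  | [] => ([], 0, 0)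
  | [i] =>
    ((if i.1.1 = i.2.1 ∨ i.1.2 = i.2.2 then [i] else []),
     max (max 0 i.1.1) i.2.1, max (max 0 i.1.2) i.2.2)
  | x :: y :: t =>
    let s1 := fpSolve ((x :: y :: t).take ((x :: y :: t).length / 2))
    let s2 := fpSolve ((x :: y :: t).drop ((x :: y :: t).length / 2))
    (s1.1 ++ s2.1, max s1.2.1 s2.2.1, max s1.2.2 s2.2.2)
termination_by l.length
decreasing_by
  · simp [List.length_take]; omega
  · simp [List.length_drop]; omega

def filter_part1_alt (inputs : List ((Int × Int) × (Int × Int))) : (List ((Int × Int) × (Int × Int))) × (Int × Int) :=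
  let s := fpSolve inputs
  (s.1, (s.2.1 + 1, s.2.2 + 1))

-- ===== PRECONDITION & SPEC =====
def Spec_filter_part1 (inputs : List ((Int × Int) × (Int × Int))) (out : (List ((Int × Int) × (Int × Int))) × (Int × Int)) : Prop := out = filter_part1_alt inputs
instance (inputs : List ((Int × Int) × (Int × Int))) (out : (List ((Int × Int) × (Int × Int))) × (Int × Int)) : Decidable (Spec_filter_part1 inputs out) := by unfold Spec_filter_part1; infer_instance

-- ===== CLAIM (what is proved, stated in full; the proofs are below) =====
def Claim_equal_filter_part1 : Prop := ∀ (inputs : List ((Int × Int) × (Int × Int))), Dom_filter_part1 inputs → Spec_filter_part1 inputs (filter_part1 inputs)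

-- ===== LEMMAS AND PROOFS =====

-- extracting one max step out of a foldl max
lemma foldl_max_pull (l : List Int) (a b : Int) :
    List.foldl max (max a b) l = max a (List.foldl max b l) := by
  induction l generalizing b with
  | nil => simp
  | cons x t ih =>
    simp only [List.foldl_cons, max_assoc]
    exact ih (max b x)

lemma foldl_max_le (l : List Int) (m : Int) : m ≤ List.foldl max m l := by
  induction l generalizing m with
  | nil => simp
  | cons x t ih => exact le_trans (le_max_left m x) (ih _)

lemma foldl_max_append (l₁ l₂ : List Int) :
    List.foldl max 0 (l₁ ++ l₂) = max (List.foldl max 0 l₁) (List.foldl max 0 l₂) := by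
  rw [List.foldl_append]
  have h0 : (0 : Int) ≤ List.foldl max 0 l₁ := foldl_max_le l₁ 0
  calc List.foldl max (List.foldl max 0 l₁) l₂
      = List.foldl max (max (List.foldl max 0 l₁) 0) l₂ := by rw [max_eq_left h0]
    _ = max (List.foldl max 0 l₁) (List.foldl max 0 l₂) := foldl_max_pull _ _ _

def fpKey : ((Int × Int) × (Int × Int)) → Bool := fun i => decide (i.1.1 = i.2.1 ∨ i.1.2 = i.2.2)
def fpMx (l : List ((Int × Int) × (Int × Int))) : Int := List.foldl max 0 (l.map (fun i => max i.1.1 i.2.1))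
def fpMy (l : List ((Int × Int) × (Int × Int))) : Int := List.foldl max 0 (l.map (fun i => max i.1.2 i.2.2))

-- characterisation of the divide-and-conquer solver
lemma fpSolve_char (l : List ((Int × Int) × (Int × Int))) :
    fpSolve l = (l.filter fpKey, fpMx l, fpMy l) := by
  induction l using fpSolve.induct with
  | case1 => simp [fpSolve, fpMx, fpMy]
  | case2 i =>
    simp only [fpSolve, fpMx, fpMy, fpKey, List.filter, List.map, List.foldl]
    by_cases h : i.1.1 = i.2.1 ∨ i.1.2 = i.2.2 <;> simp [h, max_assoc]
  | case3 x y t ihT ihD =>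
    simp only [fpSolve, ihT, ihD]
    have htd : (x :: y :: t).take ((x :: y :: t).length / 2) ++ (x :: y :: t).drop ((x :: y :: t).length / 2) = x :: y :: t :=
      List.take_append_drop _ _
    refine Prod.ext ?_ (Prod.ext ?_ ?_) <;> simp only
    · rw [← List.filter_append, htd]
    · unfold fpMx
      rw [← foldl_max_append, ← List.map_append, htd]
    · unfold fpMy
      rw [← foldl_max_append, ← List.map_append, htd]

-- A's loop computes the same filter and 0-seeded maxima
lemma filter_part1_loop (inputs : List ((Int × Int) × (Int × Int)))
    (res : List ((Int × Int) × (Int × Int))) (mx my : Int) :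
    inputs.foldl
      (fun (st : List ((Int × Int) × (Int × Int)) × Int × Int) input =>
        let result := if input.1.1 = input.2.1 ∨ input.1.2 = input.2.2 then st.1 ++ [input] else st.1
        let max_x := if st.2.1 < input.1.1 ∨ st.2.1 < input.2.1 then max input.1.1 input.2.1 else st.2.1
        let max_y := if st.2.2 < input.1.2 ∨ st.2.2 < input.2.2 then max input.1.2 input.2.2 else st.2.2
        (result, max_x, max_y))
      (res, mx, my)
    = (res ++ inputs.filter fpKey,
       (inputs.map (fun i => max i.1.1 i.2.1)).foldl max mx,
       (inputs.map (fun i => max i.1.2 i.2.2)).foldl max my) := by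
  induction inputs generalizing res mx my with
  | nil => simp
  | cons a t ih =>
    simp only [List.foldl_cons, List.filter_cons, List.map_cons]
    rw [ih]
    have hx : (if mx < a.1.1 ∨ mx < a.2.1 then max a.1.1 a.2.1 else mx) = max mx (max a.1.1 a.2.1) := by
      split_ifs with h <;> omega
    have hy : (if my < a.1.2 ∨ my < a.2.2 then max a.1.2 a.2.2 else my) = max my (max a.1.2 a.2.2) := by
      split_ifs with h <;> omega
    by_cases h : a.1.1 = a.2.1 ∨ a.1.2 = a.2.2 <;>
      simp [h, hx, hy, fpKey]

-- ===== VERDICT (by name: the statement is the Claim_ definition above) =====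
theorem filter_part1_spec : Claim_equal_filter_part1 := by
  intro inputs _
  unfold Spec_filter_part1 filter_part1 filter_part1_alt
  simp only [filter_part1_loop, fpSolve_char, fpMx, fpMy, List.nil_append]
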